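-- pv_equiv track=rewrite | github.com/TamaraVerbeek/Thesis | LSTM.py | split_into_pieces_greedy
-- ===== SOURCE A (Python) =====
-- def split_into_pieces_greedy(values, num_pieces):
--     total_values = sum(values)
--     average_values_per_piece = total_values // num_pieces
--     pieces = []
--     start_index = 1
--     for _ in range(num_pieces - 1):
--         piece_size = None
--         for i, x in enumerate(values, start=start_index):
--             if abs(average_values_per_piece - sum(values[start_index:i + 1])) <= abs(average_values_per_piece - sum(values[start_index:i + 2])):
--                 piece_size = i
--                 pieces.append(piece_size)
--                 start_index = piece_size + 1
--                 break
--     pieces.append(len(values) - 1)  # Add the last index to cover all remaining values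
--     return pieces
-- ===== SOURCE B (Python) =====
-- def split_into_pieces_greedy(values, num_pieces):
--     n = len(values)
--     prefix = [0]
--     for v in values:
--         prefix.append(prefix[-1] + v)
--     average = prefix[n] // num_pieces
--     pieces = []
--     start = 1
--     if n > 0:
--         for _ in range(num_pieces - 1):
--             i = start
--             while i < n - 1 and abs(average - (prefix[i + 1] - prefix[start])) > abs(average - (prefix[i + 2] - prefix[start])):
--                 i += 1
--             pieces.append(i)
--             start = i + 1
--     pieces.append(n - 1)
--     return pieces
-- ===== Notes on version B (the rewrite author's own statement) =====
-- stated objective: alternative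
-- what changed: B builds a prefix-sum array once and runs the greedy cut scan with O(1) range sums (a forward while over indices), instead of A's nested enumerate loop that re-sums two list slices at every candidate index.
import Mathlib
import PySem

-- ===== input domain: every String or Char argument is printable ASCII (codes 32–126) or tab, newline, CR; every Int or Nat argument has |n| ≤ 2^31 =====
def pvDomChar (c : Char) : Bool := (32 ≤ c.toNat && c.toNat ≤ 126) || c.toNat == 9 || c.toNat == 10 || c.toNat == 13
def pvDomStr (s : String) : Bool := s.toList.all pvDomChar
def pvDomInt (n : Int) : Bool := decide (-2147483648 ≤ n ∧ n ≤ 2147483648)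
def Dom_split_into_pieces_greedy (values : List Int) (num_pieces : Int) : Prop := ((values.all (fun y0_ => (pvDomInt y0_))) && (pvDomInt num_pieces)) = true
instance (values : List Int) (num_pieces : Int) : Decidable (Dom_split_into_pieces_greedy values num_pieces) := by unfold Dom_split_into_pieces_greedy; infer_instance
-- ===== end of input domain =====

-- B replaces A's repeated slice re-summing with a prefix-sum array giving constant-time
-- range sums during the greedy cut scan (objective: alternative).

-- ===== PORT A =====
-- inner 'for i, x in enumerate(values, start=start_index): if …: break' loop of A
def pvA_scan (values : List Int) (avg start : Int) : List Int → Int → Option Int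
  | [], _ => none
  | _ :: rest, i =>
    if |avg - (PySem.List.slice values (some start) (some (i + 1))).sum| ≤
       |avg - (PySem.List.slice values (some start) (some (i + 2))).sum| then
      some i
    else
      pvA_scan values avg start rest (i + 1)

def split_into_pieces_greedy (values : List Int) (num_pieces : Int) : List Int :=
  let total_values := values.sum
  let average := PySem.Int.floordiv total_values num_pieces
  let st := (List.range (num_pieces - 1).toNat).foldl
    (fun (st : List Int × Int) _ =>
      match pvA_scan values average st.2 values st.2 with
      | some i => (st.1 ++ [i], i + 1)
      | none => st) ([], 1)
  st.1 ++ [(values.length : Int) - 1]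

-- ===== PORT B =====
-- prefix.append(prefix[-1] + v) loop of Source B (the leading 0 is consed on by the caller)
def pvB_prefix : List Int → Int → List Int
  | [], _ => []
  | v :: xs, last => (last + v) :: pvB_prefix xs (last + v)

-- the 'while i < n - 1 and abs(…) > abs(…): i += 1' loop of Source B; fuel (n-1)-start is
-- exact: when it runs out i ≥ n - 1 and the Python loop condition is false anyway
def pvB_while (avg n : Int) (pre : List Int) (start : Int) : Nat → Int → Int
  | 0, i => i
  | fuel + 1, i =>
    if i < n - 1 ∧
       |avg - (pre.getD (i + 1).toNat 0 - pre.getD start.toNat 0)| >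
       |avg - (pre.getD (i + 2).toNat 0 - pre.getD start.toNat 0)| then
      pvB_while avg n pre start fuel (i + 1)
    else i

def split_into_pieces_greedy_alt (values : List Int) (num_pieces : Int) : List Int :=
  let n : Int := values.length
  let pre : List Int := 0 :: pvB_prefix values 0
  let average := PySem.Int.floordiv (pre.getD n.toNat 0) num_pieces
  let st :=
    if 0 < n then
      (List.range (num_pieces - 1).toNat).foldl
        (fun (st : List Int × Int) _ =>
          let i := pvB_while average n pre st.2 ((n - 1) - st.2).toNat st.2
          (st.1 ++ [i], i + 1)) ([], 1)
    else ([], 1)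
  st.1 ++ [n - 1]

-- ===== PRECONDITION & SPEC =====
-- Pre_ excludes exactly num_pieces = 0, where A (and B) raise ZeroDivisionError.
def Pre_split_into_pieces_greedy (values : List Int) (num_pieces : Int) : Prop := num_pieces ≠ 0
instance (values : List Int) (num_pieces : Int) : Decidable (Pre_split_into_pieces_greedy values num_pieces) := by unfold Pre_split_into_pieces_greedy; infer_instance

def pvWitness_split_into_pieces_greedy : List Int × Int := ([3, 1, 4, 1, 5, 9], 3)

def Spec_split_into_pieces_greedy (values : List Int) (num_pieces : Int) (out : List Int) : Prop := out = split_into_pieces_greedy_alt values num_pieces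
instance (values : List Int) (num_pieces : Int) (out : List Int) : Decidable (Spec_split_into_pieces_greedy values num_pieces out) := by unfold Spec_split_into_pieces_greedy; infer_instance

-- ===== CLAIM (what is proved, stated in full; the proofs are below) =====
def Claim_equal_split_into_pieces_greedy : Prop := ∀ (values : List Int) (num_pieces : Int), Dom_split_into_pieces_greedy values num_pieces → Pre_split_into_pieces_greedy values num_pieces → Spec_split_into_pieces_greedy values num_pieces (split_into_pieces_greedy values num_pieces)

-- ===== LEMMAS AND PROOFS =====

-- prefix-sum array correctness
lemma pvB_prefix_getD (xs : List Int) : ∀ (acc : Int) (k : Nat), k < xs.length →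
    (pvB_prefix xs acc).getD k 0 = acc + (xs.take (k + 1)).sum := by
  induction xs with
  | nil => intro acc k h; simp at h
  | cons v t ih =>
    intro acc k h
    cases k with
    | zero => simp [pvB_prefix]
    | succ k =>
      simp only [pvB_prefix, List.getD_cons_succ, List.take_succ_cons, List.sum_cons]
      rw [ih (acc + v) k (by simpa using h)]
      ring

lemma pre_getD (values : List Int) : ∀ (k : Nat), k ≤ values.length →
    (0 :: pvB_prefix values 0).getD k 0 = (values.take k).sum := by
  intro k hk
  cases k with
  | zero => simp
  | succ k =>
    simp only [List.getD_cons_succ]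
    rw [pvB_prefix_getD values 0 k (by omega)]
    simp

-- sum of a Python slice as a difference of take-sums
lemma slice_sum (values : List Int) (a b : Int) (h0 : 0 ≤ a) (hab : a ≤ b) :
    (PySem.List.slice values (some a) (some b)).sum
      = (values.take b.toNat).sum - (values.take a.toNat).sum := by
  rw [PySem.List.slice_toNat values h0 (le_trans h0 hab)]
  have : values.take b.toNat = values.take a.toNat ++ (values.drop a.toNat).take (b.toNat - a.toNat) := by
    conv_lhs => rw [show b.toNat = a.toNat + (b.toNat - a.toNat) from by omega, List.take_add]
  rw [this, List.sum_append]
  ring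

-- A's break condition is automatically true once i ≥ n - 1 (both slices clamp to the same list)
lemma condA_high (values : List Int) (avg start i : Int) (h0 : 0 ≤ start)
    (hi : (values.length : Int) - 1 ≤ i) :
    |avg - (PySem.List.slice values (some start) (some (i + 1))).sum| ≤
    |avg - (PySem.List.slice values (some start) (some (i + 2))).sum| := by
  have h1 : 0 ≤ i + 1 := by omega
  have h2 : 0 ≤ i + 2 := by omega
  rw [PySem.List.slice_toNat values h0 h1, PySem.List.slice_toNat values h0 h2]
  have hlen : (values.drop start.toNat).length ≤ (i + 1).toNat - start.toNat := by
    simp only [List.length_drop]; omega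
  have hlen2 : (values.drop start.toNat).length ≤ (i + 2).toNat - start.toNat := by
    simp only [List.length_drop]; omega
  rw [List.take_of_length_le hlen, List.take_of_length_le hlen2]

-- the two break conditions agree while i is strictly inside the list
lemma cond_iff (values : List Int) (avg start i : Int) (h0 : 0 ≤ start) (hsi : start ≤ i)
    (hin : i < (values.length : Int) - 1) :
    (|avg - (PySem.List.slice values (some start) (some (i + 1))).sum| ≤
     |avg - (PySem.List.slice values (some start) (some (i + 2))).sum|)
    ↔ (|avg - ((0 :: pvB_prefix values 0).getD (i + 1).toNat 0 - (0 :: pvB_prefix values 0).getD start.toNat 0)| ≤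
       |avg - ((0 :: pvB_prefix values 0).getD (i + 2).toNat 0 - (0 :: pvB_prefix values 0).getD start.toNat 0)|) := by
  rw [slice_sum values start (i + 1) h0 (by omega), slice_sum values start (i + 2) h0 (by omega),
      pre_getD values (i + 1).toNat (by omega), pre_getD values (i + 2).toNat (by omega),
      pre_getD values start.toNat (by omega)]

-- B's while only moves forward
lemma pvB_while_ge (avg n : Int) (pre : List Int) (start : Int) :
    ∀ (fuel : Nat) (i : Int), i ≤ pvB_while avg n pre start fuel i := by
  intro fuel
  induction fuel with
  | zero => intro i; simp [pvB_while]
  | succ f ih =>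
    intro i
    simp only [pvB_while]
    split
    · exact le_trans (by omega) (ih (i + 1))
    · exact le_rfl

-- core: A's inner scan finds exactly the index B's prefix-sum while loop finds
lemma scan_eq (values : List Int) (avg start : Int) (hs : 1 ≤ start) :
    ∀ (rest : List Int) (i : Int), rest ≠ [] →
      i + (rest.length : Int) = start + (values.length : Int) → start ≤ i →
      pvA_scan values avg start rest i =
        some (pvB_while avg (values.length : Int) (0 :: pvB_prefix values 0) start
                ((((values.length : Int) - 1) - i).toNat) i) := by
  intro rest
  induction rest with
  | nil => intro i h; exact absurd rfl h
  | cons x rest ih =>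
    intro i _ hlen hsi
    set n : Int := (values.length : Int) with hn
    set pre : List Int := 0 :: pvB_prefix values 0 with hpre
    by_cases hP : |avg - (PySem.List.slice values (some start) (some (i + 1))).sum| ≤
                  |avg - (PySem.List.slice values (some start) (some (i + 2))).sum|
    · -- condition holds: A breaks at i, B's while stops at i
      rw [pvA_scan, if_pos hP]
      rcases Nat.eq_zero_or_pos ((n - 1) - i).toNat with hf | hf
      · rw [hf, pvB_while]
      · obtain ⟨f, hfe⟩ : ∃ f, ((n - 1) - i).toNat = f + 1 := ⟨((n - 1) - i).toNat - 1, by omega⟩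
        have hin : i < n - 1 := by omega
        rw [hfe, pvB_while, if_neg]
        rintro ⟨-, hgt⟩
        exact absurd ((cond_iff values avg start i (by omega) hsi hin).mp hP) (not_le.mpr hgt)
    · -- condition fails: i < n - 1 and both loops step to i + 1
      have hin : i < n - 1 := by
        by_contra hc
        exact hP (condA_high values avg start i (by omega) (by omega))
      rw [pvA_scan, if_neg hP]
      have hfe : ((n - 1) - i).toNat = ((n - 1) - (i + 1)).toNat + 1 := by omega
      rw [hfe, pvB_while, if_pos]
      · have hlen' : i + 1 + (rest.length : Int) = start + n := by
          simp only [List.length_cons] at hlen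
          push_cast at hlen ⊢
          omega
        have hrest : rest ≠ [] := by
          intro hre
          rw [hre] at hlen'
          simp only [List.length_nil, Int.natCast_zero, add_zero] at hlen'
          omega
        have := ih (i + 1) hrest hlen' (by omega)
        rw [this]
      · refine ⟨hin, ?_⟩
        exact not_le.mp ((cond_iff values avg start i (by omega) hsi hin).not.mp hP)

-- the two outer folds agree step by step (nonempty values)
lemma fold_eq (values : List Int) (avg : Int) (hne : values ≠ []) :
    ∀ (l : List Nat) (st : List Int × Int), 1 ≤ st.2 →
      l.foldl (fun (st : List Int × Int) _ =>
          match pvA_scan values avg st.2 values st.2 with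
          | some i => (st.1 ++ [i], i + 1)
          | none => st) st
      = l.foldl (fun (st : List Int × Int) _ =>
          let i := pvB_while avg (values.length : Int) (0 :: pvB_prefix values 0) st.2
                     ((((values.length : Int) - 1) - st.2).toNat) st.2
          (st.1 ++ [i], i + 1)) st := by
  intro l
  induction l with
  | nil => intro st _; rfl
  | cons a l ih =>
    intro st hst
    have hsc := scan_eq values avg st.2 hst values st.2 hne (by ring) le_rfl
    simp only [List.foldl_cons, hsc]
    have hge := pvB_while_ge avg (values.length : Int) (0 :: pvB_prefix values 0) st.2
      ((((values.length : Int) - 1) - st.2).toNat) st.2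
    exact ih _ (by simp only; omega)

-- empty values: A's inner scan never fires, so the fold is the identity
lemma fold_nil (avg : Int) :
    ∀ (l : List Nat) (st : List Int × Int),
      l.foldl (fun (st : List Int × Int) _ =>
          match pvA_scan ([] : List Int) avg st.2 [] st.2 with
          | some i => (st.1 ++ [i], i + 1)
          | none => st) st = st := by
  intro l
  induction l with
  | nil => intro st; rfl
  | cons a l ih => intro st; simp only [List.foldl_cons, pvA_scan]; exact ih st

-- ===== VERDICT (by name: the statement is the Claim_ definition above) =====
theorem split_into_pieces_greedy_spec : Claim_equal_split_into_pieces_greedy := by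
  intro values num_pieces _ _
  have htot : (0 :: pvB_prefix values 0).getD (values.length : Int).toNat 0 = values.sum := by
    rw [Int.toNat_natCast, pre_getD values values.length le_rfl, List.take_length]
  simp only [Spec_split_into_pieces_greedy, split_into_pieces_greedy,
    split_into_pieces_greedy_alt, htot]
  cases values with
  | nil => simp [fold_nil]
  | cons v t =>
    have hne : (v :: t : List Int) ≠ [] := by simp
    rw [if_pos (show (0 : Int) < ((v :: t).length : Int) by simp)]
    rw [fold_eq (v :: t) _ hne (List.range (num_pieces - 1).toNat) ([], 1) le_rfl]
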